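-- pv_equiv track=rewrite | github.com/andersen-mats/H24 | IN1000/eksamen/2022/5b.py | hvilke_tre_kast
-- ===== SOURCE A (Python) =====
-- def stigespill(terningkast, stiger):
--
--     pos = 0
--
--     for kast in terningkast:
--         pos += kast
--         if pos in stiger:
--             pos = stiger[pos]
--
--     return pos
--
-- def hvilke_tre_kast(slutt_rute, stiger):
--     ret = []
--
--     for x in range(1,7):
--         for y in range(1,7):
--             for z in range(1,7):
--                 temp = [x,y,z]
--                 if stigespill(temp,stiger) == slutt_rute and temp not in ret:
--                     ret.append(temp)
--     return ret
-- ===== SOURCE B (Python) =====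
-- def hvilke_tre_kast(slutt_rute, stiger):
--     def rolls(p, k):
--         # all dice sequences of length k that move the board position p to
--         # slutt_rute, generated in lexicographic order
--         if k == 0:
--             return [[]] if p == slutt_rute else []
--         out = []
--         for d in range(1, 7):
--             q = p + d
--             q = stiger.get(q, q)
--             out.extend([d] + rest for rest in rolls(q, k - 1))
--         return out
--     return rolls(0, 3)
-- ===== Notes on version B (the rewrite author's own statement) =====
-- stated objective: alternative
-- what changed: B generates the winning dice sequences by recursion on the number of remaining throws from the current board position (a prefix-sharing search tree), instead of A's three nested loops that re-simulate all three throws for every one of the 216 triples and linearly scan ret for duplicates.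
import Mathlib
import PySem

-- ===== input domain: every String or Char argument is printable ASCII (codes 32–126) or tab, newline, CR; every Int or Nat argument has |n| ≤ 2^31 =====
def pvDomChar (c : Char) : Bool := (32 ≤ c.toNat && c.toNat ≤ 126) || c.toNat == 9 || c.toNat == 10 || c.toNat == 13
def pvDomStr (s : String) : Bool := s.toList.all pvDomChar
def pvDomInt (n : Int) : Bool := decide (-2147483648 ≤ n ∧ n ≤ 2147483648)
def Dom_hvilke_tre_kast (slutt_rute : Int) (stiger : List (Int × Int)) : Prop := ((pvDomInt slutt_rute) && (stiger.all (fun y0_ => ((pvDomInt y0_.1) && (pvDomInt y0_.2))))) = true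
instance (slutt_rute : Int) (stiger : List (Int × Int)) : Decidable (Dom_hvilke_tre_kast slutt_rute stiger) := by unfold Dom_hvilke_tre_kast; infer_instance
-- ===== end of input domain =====

-- B generates the winning dice sequences by recursion on the number of remaining
-- throws from the current board position (sharing prefixes) instead of re-simulating
-- every one of the 216 triples and scanning ret for duplicates (objective: alternative).

-- ===== PORT A =====
def stigespill (terningkast : List Int) (stiger : List (Int × Int)) : Int :=
  terningkast.foldl (fun pos kast =>
    let pos1 := pos + kast
    if (PySem.Dict.mk stiger).contains pos1 then ((PySem.Dict.mk stiger).get? pos1).getD pos1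
    else pos1) 0

def hvilke_tre_kast (slutt_rute : Int) (stiger : List (Int × Int)) : List (List Int) :=
  (PySem.List.pyRange 1 7 1).foldl (fun ret x =>
    (PySem.List.pyRange 1 7 1).foldl (fun ret y =>
      (PySem.List.pyRange 1 7 1).foldl (fun ret z =>
        if stigespill [x, y, z] stiger = slutt_rute ∧ ¬ [x, y, z] ∈ ret then ret ++ [[x, y, z]]
        else ret) ret) ret) []

-- ===== PORT B =====
-- rolls(p, k): all dice sequences of length k that move position p to slutt_rute
def pvRolls (slutt_rute : Int) (stiger : List (Int × Int)) : Int → Nat → List (List Int)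
  | p, 0 => if p = slutt_rute then [[]] else []
  | p, Nat.succ k =>
    (PySem.List.pyRange 1 7 1).foldl (fun out d =>
      let q := p + d
      let q2 := (PySem.Dict.mk stiger).getD q q
      out ++ (pvRolls slutt_rute stiger q2 k).map (fun rest => d :: rest)) []

def hvilke_tre_kast_alt (slutt_rute : Int) (stiger : List (Int × Int)) : List (List Int) :=
  pvRolls slutt_rute stiger 0 3

-- ===== PRECONDITION & SPEC =====
def Spec_hvilke_tre_kast (slutt_rute : Int) (stiger : List (Int × Int)) (out : List (List Int)) : Prop := out = hvilke_tre_kast_alt slutt_rute stiger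
instance (slutt_rute : Int) (stiger : List (Int × Int)) (out : List (List Int)) : Decidable (Spec_hvilke_tre_kast slutt_rute stiger out) := by unfold Spec_hvilke_tre_kast; infer_instance

-- ===== CLAIM =====
def Claim_equal_hvilke_tre_kast : Prop := ∀ (slutt_rute : Int) (stiger : List (Int × Int)), Dom_hvilke_tre_kast slutt_rute stiger → Spec_hvilke_tre_kast slutt_rute stiger (hvilke_tre_kast slutt_rute stiger)

-- ===== LEMMAS AND PROOFS =====

-- one ladder step, in the shape A's port writes it
def pvLadA (stiger : List (Int × Int)) (p : Int) : Int :=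
  if (PySem.Dict.mk stiger).contains p then ((PySem.Dict.mk stiger).get? p).getD p else p

-- A's ladder step equals B's getD lookup
lemma pvLadA_eq_getD (stiger : List (Int × Int)) (p : Int) :
    pvLadA stiger p = (PySem.Dict.mk stiger).getD p p := by
  unfold pvLadA
  rw [PySem.Dict.getD_eq_get?_getD, PySem.Dict.contains_eq_isSome_get?]
  cases (PySem.Dict.mk stiger).get? p <;> simp

-- a loop whose body is itself a fold is a fold over the flattened list
lemma pv_foldl_flatMap {α β γ : Type} (h : α → List β) (g : γ → β → γ) (l : List α) (init : γ) :
    l.foldl (fun r x => (h x).foldl g r) init = (l.flatMap h).foldl g init := by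
  induction l generalizing init with
  | nil => rfl
  | cons x xs ih => simp only [List.foldl_cons, List.flatMap_cons, List.foldl_append, ih]

lemma pv_nested2 {γ : Type} (g : γ → List Int → γ) (x : Int) (ys zs : List Int) (init : γ) :
    ys.foldl (fun r y => zs.foldl (fun r z => g r [x, y, z]) r) init
      = (ys.flatMap (fun y => zs.map (fun z => [x, y, z]))).foldl g init := by
  rw [← pv_foldl_flatMap (fun y => zs.map (fun z => [x, y, z])) g]
  apply PySem.List.foldl_congr_mem
  intro r y _
  exact List.foldl_map.symm

lemma pv_nested3 {γ : Type} (g : γ → List Int → γ) (xs ys zs : List Int) (init : γ) :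
    xs.foldl (fun r x => ys.foldl (fun r y => zs.foldl (fun r z => g r [x, y, z]) r) r) init
      = (xs.flatMap (fun x => ys.flatMap (fun y => zs.map (fun z => [x, y, z])))).foldl g init := by
  rw [← pv_foldl_flatMap (fun x => ys.flatMap (fun y => zs.map (fun z => [x, y, z]))) g]
  apply PySem.List.foldl_congr_mem
  intro r x _
  exact pv_nested2 g x ys zs r

-- A's append-with-membership-check loop over a duplicate-free list is a filter
lemma pv_foldl_nodup_filter {α : Type} [BEq α] [LawfulBEq α] (P : α → Prop) [DecidablePred P]
    (l : List α) (acc : List α) (hnd : l.Nodup) (hdisj : ∀ t ∈ l, t ∉ acc) :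
    l.foldl (fun r t => if P t ∧ ¬ t ∈ r then r ++ [t] else r) acc
      = acc ++ l.filter (fun t => decide (P t)) := by
  induction l generalizing acc with
  | nil => simp
  | cons t ls ih =>
    rcases List.nodup_cons.mp hnd with ⟨htl, hnd'⟩
    by_cases hP : P t
    · have hmem : t ∉ acc := hdisj t (List.mem_cons_self ..)
      rw [List.foldl_cons, if_pos ⟨hP, hmem⟩,
        ih (acc ++ [t]) hnd' (by
          intro u hu
          simp only [List.mem_append, List.mem_singleton]
          rintro (h | rfl)
          · exact hdisj u (List.mem_cons_of_mem _ hu) h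
          · exact htl hu)]
      simp [hP]
    · rw [List.foldl_cons, if_neg (by simp [hP]),
        ih acc hnd' (fun u hu => hdisj u (List.mem_cons_of_mem _ hu))]
      simp [hP]

-- filter of a map is a flatMap of singletons / empties
lemma pv_filter_map_flatMap {α β : Type} (f : α → β) (P : β → Bool) (l : List α) :
    (l.map f).filter P = l.flatMap (fun a => if P (f a) then [f a] else []) := by
  induction l with
  | nil => rfl
  | cons a l ih =>
    by_cases h : P (f a) = true <;>
      simp [List.flatMap_cons, h, ih]

-- A's three-throw simulation as a chain of ladder steps
lemma pv_sim_eq (stiger : List (Int × Int)) (a b c : Int) :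
    stigespill [a, b, c] stiger
      = pvLadA stiger (pvLadA stiger (pvLadA stiger (0 + a) + b) + c) := by
  simp only [stigespill, pvLadA, List.foldl_cons, List.foldl_nil]

-- unfolding B's loop: one level of rolls is a flatMap
lemma pv_rolls_succ (s : Int) (stiger : List (Int × Int)) (p : Int) (k : Nat) :
    pvRolls s stiger p (k + 1)
      = (PySem.List.pyRange 1 7 1).flatMap (fun d =>
          (pvRolls s stiger ((PySem.Dict.mk stiger).getD (p + d) (p + d)) k).map
            (fun rest => d :: rest)) := by
  rw [pvRolls]
  exact PySem.List.foldl_append_eq_flatMap _ _ _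

-- the 216 triples A enumerates are duplicate-free
lemma pv_triples_nodup :
    ((PySem.List.pyRange 1 7 1).flatMap (fun x => (PySem.List.pyRange 1 7 1).flatMap
        (fun y => (PySem.List.pyRange 1 7 1).map (fun z => [x, y, z])))).Nodup := by
  have hR := PySem.List.nodup_pyRange_one 1 7
  refine List.nodup_flatMap.2 ⟨fun x _ => ?_, ?_⟩
  · refine List.nodup_flatMap.2 ⟨fun y _ => ?_, ?_⟩
    · exact hR.map (fun a b h => by simpa using h)
    · refine hR.imp (fun {y1 y2} hne t h1 h2 => ?_)
      rcases List.mem_map.1 h1 with ⟨a, _, rfl⟩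
      rcases List.mem_map.1 h2 with ⟨b, _, hb⟩
      simp only [List.cons.injEq] at hb
      exact hne hb.2.1.symm
  · refine hR.imp (fun {x1 x2} hne t h1 h2 => ?_)
    rcases List.mem_flatMap.1 h1 with ⟨y1, _, hy1⟩
    rcases List.mem_flatMap.1 h2 with ⟨y2, _, hy2⟩
    rcases List.mem_map.1 hy1 with ⟨a, _, rfl⟩
    rcases List.mem_map.1 hy2 with ⟨b, _, hb⟩
    simp only [List.cons.injEq] at hb
    exact hne hb.1.symm

-- ===== VERDICT =====
theorem hvilke_tre_kast_spec : Claim_equal_hvilke_tre_kast := by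
  intro slutt_rute stiger _
  show hvilke_tre_kast slutt_rute stiger = hvilke_tre_kast_alt slutt_rute stiger
  -- A as a filter over the 216 enumerated triples
  have hA : hvilke_tre_kast slutt_rute stiger
      = ((PySem.List.pyRange 1 7 1).flatMap (fun x => (PySem.List.pyRange 1 7 1).flatMap
          (fun y => (PySem.List.pyRange 1 7 1).map (fun z => [x, y, z])))).filter
            (fun t => decide (stigespill t stiger = slutt_rute)) := by
    refine Eq.trans (pv_nested3
        (fun (r : List (List Int)) (t : List Int) =>
          if stigespill t stiger = slutt_rute ∧ ¬ t ∈ r then r ++ [t] else r)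
        (PySem.List.pyRange 1 7 1) (PySem.List.pyRange 1 7 1) (PySem.List.pyRange 1 7 1) []) ?_
    rw [pv_foldl_nodup_filter (fun t => stigespill t stiger = slutt_rute) _ []
      pv_triples_nodup (by simp)]
    simp
  rw [hA, hvilke_tre_kast_alt]
  rw [pv_rolls_succ]
  rw [List.filter_flatMap]
  refine List.flatMap_congr (fun x _ => ?_)
  rw [pv_rolls_succ, List.map_flatMap, List.filter_flatMap]
  refine List.flatMap_congr (fun y _ => ?_)
  rw [pv_rolls_succ, List.map_flatMap, List.map_flatMap]
  rw [pv_filter_map_flatMap (fun z => [x, y, z])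
    (fun t => decide (stigespill t stiger = slutt_rute))]
  refine List.flatMap_congr (fun z _ => ?_)
  simp only [pv_sim_eq, pvLadA_eq_getD, pvRolls, zero_add]
  split_ifs <;> simp_all
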